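-- pv_equiv track=rewrite | github.com/AstronautCharlie/Real_Simple_RL | Agent/UDMAgent.py | match_interval_to_group
-- ===== SOURCE A (Python) =====
-- def match_interval_to_group(interval, group):
--     """
--     Test whether the interval matches the group, i.e. whether the interval overlaps with every interval in group.
--     Group is a list of tuples.
--     Returns true or false
--     """
--     for other_interval in group:
--         if (interval[1] - interval[0] > 0):
--             if interval[0] >= other_interval[1] or interval[1] <= other_interval[0]:
--                 return False
--         else:
--             if interval[0] > other_interval[1] or interval[1] < other_interval[0]:
--                 return False
--     return True
-- ===== SOURCE B (Python) =====
-- def match_interval_to_group(interval, group):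
--     """Aggregate-then-compare reimplementation: one overlap test against
--     the group's tightest bounds instead of an early-return loop."""
--     if not group:
--         return True
--     lo = max(o[0] for o in group)
--     hi = min(o[1] for o in group)
--     if interval[1] - interval[0] > 0:
--         return interval[0] < hi and interval[1] > lo
--     return interval[0] <= hi and interval[1] >= lo
-- ===== Notes on version B (the rewrite author's own statement) =====
-- stated objective: simpler
-- what changed: Replaces the early-return per-element loop by aggregating the group's tightest bounds (max of lows, min of highs) and doing a single overlap comparison.
import Mathlib
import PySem

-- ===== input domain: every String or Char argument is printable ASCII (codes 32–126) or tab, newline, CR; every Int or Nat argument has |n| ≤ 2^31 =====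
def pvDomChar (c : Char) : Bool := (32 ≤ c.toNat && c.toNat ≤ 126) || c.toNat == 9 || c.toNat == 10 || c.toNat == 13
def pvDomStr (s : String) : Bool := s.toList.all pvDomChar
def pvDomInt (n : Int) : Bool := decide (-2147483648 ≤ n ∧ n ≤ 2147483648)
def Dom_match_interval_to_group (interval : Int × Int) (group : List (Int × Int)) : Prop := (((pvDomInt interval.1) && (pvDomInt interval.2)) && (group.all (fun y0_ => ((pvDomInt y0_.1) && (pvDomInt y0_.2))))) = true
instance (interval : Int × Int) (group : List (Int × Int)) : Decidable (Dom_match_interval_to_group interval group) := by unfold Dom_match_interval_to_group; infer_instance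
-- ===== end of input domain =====

-- B replaces A's early-return per-element loop by aggregating the group's tightest
-- bounds (max of lows, min of highs) and doing a single overlap comparison (simpler).


-- ===== PORT A =====
-- loop over group with early return False, else True at the end
def match_interval_to_group (interval : Int × Int) (group : List (Int × Int)) : Bool :=
  match group with
  | [] => true
  | o :: rest =>
    if interval.2 - interval.1 > 0 then
      if interval.1 ≥ o.2 ∨ interval.2 ≤ o.1 then false
      else match_interval_to_group interval rest
    else
      if interval.1 > o.2 ∨ interval.2 < o.1 then false
      else match_interval_to_group interval rest

-- ===== PORT B =====
-- max(o[0] for o in group) / min(o[1] for o in group) over a nonempty group,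
-- ported as folds from the first element; then one comparison
def match_interval_to_group_alt (interval : Int × Int) (group : List (Int × Int)) : Bool :=
  match group with
  | [] => true
  | h :: t =>
    let lo := t.foldl (fun a o => max a o.1) h.1
    let hi := t.foldl (fun a o => min a o.2) h.2
    if interval.2 - interval.1 > 0 then
      decide (interval.1 < hi) && decide (interval.2 > lo)
    else
      decide (interval.1 ≤ hi) && decide (interval.2 ≥ lo)

-- ===== PRECONDITION & SPEC =====
def Spec_match_interval_to_group (interval : Int × Int) (group : List (Int × Int)) (out : Bool) : Prop := out = match_interval_to_group_alt interval group
instance (interval : Int × Int) (group : List (Int × Int)) (out : Bool) : Decidable (Spec_match_interval_to_group interval group out) := by unfold Spec_match_interval_to_group; infer_instance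

-- ===== CLAIM (what is proved, stated in full; the proofs are below) =====
def Claim_equal_match_interval_to_group : Prop := ∀ (interval : Int × Int) (group : List (Int × Int)), Dom_match_interval_to_group interval group → Spec_match_interval_to_group interval group (match_interval_to_group interval group)

-- ===== LEMMAS AND PROOFS =====

theorem foldl_min_lt (t : List (Int × Int)) (a i : Int) :
    i < t.foldl (fun a o => min a o.2) a ↔ i < a ∧ ∀ o ∈ t, i < o.2 := by
  induction t generalizing a with
  | nil => simp
  | cons h t ih => simp [List.foldl_cons, ih]; tauto

theorem foldl_min_le (t : List (Int × Int)) (a i : Int) :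
    i ≤ t.foldl (fun a o => min a o.2) a ↔ i ≤ a ∧ ∀ o ∈ t, i ≤ o.2 := by
  induction t generalizing a with
  | nil => simp
  | cons h t ih => simp [List.foldl_cons, ih]; tauto

theorem foldl_max_lt (t : List (Int × Int)) (a i : Int) :
    t.foldl (fun a o => max a o.1) a < i ↔ a < i ∧ ∀ o ∈ t, o.1 < i := by
  induction t generalizing a with
  | nil => simp
  | cons h t ih => simp [List.foldl_cons, ih]; tauto

theorem foldl_max_le (t : List (Int × Int)) (a i : Int) :
    t.foldl (fun a o => max a o.1) a ≤ i ↔ a ≤ i ∧ ∀ o ∈ t, o.1 ≤ i := by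
  induction t generalizing a with
  | nil => simp
  | cons h t ih => simp [List.foldl_cons, ih]; tauto

-- A computed as a per-element conjunction
theorem A_eq_all (interval : Int × Int) (group : List (Int × Int)) :
    match_interval_to_group interval group =
      group.all (fun o =>
        if interval.2 - interval.1 > 0 then
          decide (interval.1 < o.2 ∧ interval.2 > o.1)
        else
          decide (interval.1 ≤ o.2 ∧ interval.2 ≥ o.1)) := by
  induction group with
  | nil => rfl
  | cons o rest ih =>
    simp only [match_interval_to_group, List.all_cons, ih]
    split_ifs with hw h1 h2 <;> simp_all <;> omega

-- B too equals the same per-element conjunction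
theorem B_eq_all (interval : Int × Int) (group : List (Int × Int)) :
    match_interval_to_group_alt interval group =
      group.all (fun o =>
        if interval.2 - interval.1 > 0 then
          decide (interval.1 < o.2 ∧ interval.2 > o.1)
        else
          decide (interval.1 ≤ o.2 ∧ interval.2 ≥ o.1)) := by
  cases group with
  | nil => rfl
  | cons h t =>
    simp only [match_interval_to_group_alt]
    split_ifs with hw
    · rw [Bool.eq_iff_iff]
      simp [foldl_min_lt, foldl_max_lt, List.all_eq_true]
      exact ⟨fun ⟨⟨x1,x2⟩,y1,y2⟩ => ⟨⟨x1,y1⟩, fun a b m => ⟨x2 a b m, y2 a b m⟩⟩, fun ⟨⟨x1,y1⟩,f⟩ => ⟨⟨x1, fun a b m => (f a b m).1⟩, y1, fun a b m => (f a b m).2⟩⟩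
    · rw [Bool.eq_iff_iff]
      simp [foldl_min_le, foldl_max_le, List.all_eq_true]
      exact ⟨fun ⟨⟨x1,x2⟩,y1,y2⟩ => ⟨⟨x1,y1⟩, fun a b m => ⟨x2 a b m, y2 a b m⟩⟩, fun ⟨⟨x1,y1⟩,f⟩ => ⟨⟨x1, fun a b m => (f a b m).1⟩, y1, fun a b m => (f a b m).2⟩⟩

-- ===== VERDICT (by name: the statement is the Claim_ definition above) =====
theorem match_interval_to_group_spec : Claim_equal_match_interval_to_group := by
  intro interval group _
  unfold Spec_match_interval_to_group
  rw [A_eq_all, B_eq_all]
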